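-- pv_equiv track=rewrite | github.com/trungtin1998/tetctf2021 | super_calc.py | get_triple_xor_string
-- ===== SOURCE A (Python) =====
-- def get_triple_xor_string(expected_string, allowed_string):
-- 	w1 = w2 = w3 = ""
-- 	for i in expected_string:
-- 		ok = 0
-- 		for j in allowed_string:
-- 			for k in allowed_string:
-- 				c = chr(ord(i) ^ ord(j) ^ ord(k))
-- 				if c in allowed_string:
-- 					w1 += j
-- 					w2 += k
-- 					w3 += c
-- 					ok = 1
-- 					break
-- 			if ok == 1:
-- 				break
-- 	return w1,w2,w3
-- ===== SOURCE B (Python) =====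
-- def get_triple_xor_string(expected_string, allowed_string):
--     # Precompute: for each xor byte x = ord(j)^ord(k), the FIRST pair (j,k)
--     # in nested-scan order (distinct chars in first-occurrence order give the
--     # same first pair per key); then each expected char needs only one scan of
--     # the (<=256-entry) table instead of a quadratic pair scan.
--     allowed = set(allowed_string)
--     uniq = list(dict.fromkeys(allowed_string))
--     table = {}
--     for j in uniq:
--         for k in uniq:
--             x = ord(j) ^ ord(k)
--             if x not in table:
--                 table[x] = (j, k)
--     w1, w2, w3 = [], [], []
--     for i in expected_string:
--         for x, (j, k) in table.items():
--             c = chr(ord(i) ^ x)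
--             if c in allowed:
--                 w1.append(j)
--                 w2.append(k)
--                 w3.append(c)
--                 break
--     return "".join(w1), "".join(w2), "".join(w3)
-- ===== Notes on version B (the rewrite author's own statement) =====
-- stated objective: alternative
-- what changed: Replaces A's per-character nested scan over all (j,k) allowed pairs by a dict built once over the distinct allowed chars, mapping each xor byte to its first (j,k) pair in nested-scan order; each expected character then scans only the <=256-entry table. Intended as faster in the worst case (O(n*m^2) -> O(n + u^2)); measured between 1.3x and 6x depending on input family, so no unqualified speed claim.
import Mathlib
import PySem

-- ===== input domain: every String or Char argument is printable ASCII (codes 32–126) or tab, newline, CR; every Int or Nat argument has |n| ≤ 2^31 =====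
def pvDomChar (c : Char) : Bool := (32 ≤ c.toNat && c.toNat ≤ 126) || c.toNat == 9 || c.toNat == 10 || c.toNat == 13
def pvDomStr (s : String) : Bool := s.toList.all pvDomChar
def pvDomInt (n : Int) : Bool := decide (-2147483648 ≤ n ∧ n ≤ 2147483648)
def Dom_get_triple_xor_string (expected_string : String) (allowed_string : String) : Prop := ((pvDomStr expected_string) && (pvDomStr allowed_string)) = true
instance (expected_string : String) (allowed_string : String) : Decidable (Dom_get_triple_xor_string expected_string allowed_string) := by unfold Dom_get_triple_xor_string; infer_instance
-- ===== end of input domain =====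

-- B replaces A's per-character quadratic pair scan by a table keyed by the xor byte,
-- built once, looked up per character (alternative algorithm; faster in the worst case, not on dense allowed sets).
-- Python A returns a 3-tuple of strings; both ports return it as a 3-element list.

-- ===== PORT A =====
-- inner `for k in allowed_string` loop (with break)
def pvA_loopK (i j : Char) (al : List Char) : List Char → Option (Char × Char × Char)
  | [] => none
  | k :: ks =>
    let c := Char.ofNat (i.toNat ^^^ j.toNat ^^^ k.toNat)
    if al.contains c then some (j, k, c) else pvA_loopK i j al ks

-- outer `for j in allowed_string` loop (ok-flag break)
def pvA_loopJ (i : Char) (al : List Char) : List Char → Option (Char × Char × Char)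
  | [] => none
  | j :: js =>
    match pvA_loopK i j al al with
    | some r => some r
    | none => pvA_loopJ i al js

def get_triple_xor_string (expected_string : String) (allowed_string : String) : List String :=
  let al := allowed_string.toList
  let fin := expected_string.toList.foldl
    (fun (acc : List Char × List Char × List Char) i =>
      match pvA_loopJ i al al with
      | some (j, k, c) => (acc.1 ++ [j], acc.2.1 ++ [k], acc.2.2 ++ [c])
      | none => acc)
    ([], [], [])
  [String.ofList fin.1, String.ofList fin.2.1, String.ofList fin.2.2]

-- ===== PORT B =====
-- `for j in uniq: for k in uniq: if x not in table: table[x] = (j,k)`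
def pvB_table (al : List Char) : PySem.Dict Nat (Char × Char) :=
  (al.flatMap (fun j => al.map (fun k => (j, k)))).foldl
    (fun tbl p =>
      let x := p.1.toNat ^^^ p.2.toNat
      if tbl.contains x then tbl else tbl.insert x p)
    PySem.Dict.empty

def get_triple_xor_string_alt (expected_string : String) (allowed_string : String) : List String :=
  let alSet := PySem.Set.ofList allowed_string.toList
  let tbl := pvB_table (PySem.List.dedup allowed_string.toList)
  let fin := expected_string.toList.foldl
    (fun (acc : List Char × List Char × List Char) i =>
      match tbl.items.find? (fun en => PySem.Set.contains alSet (Char.ofNat (i.toNat ^^^ en.1))) with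
      | some (x, j, k) => (acc.1 ++ [j], acc.2.1 ++ [k], acc.2.2 ++ [Char.ofNat (i.toNat ^^^ x)])
      | none => acc)
    ([], [], [])
  [String.ofList fin.1, String.ofList fin.2.1, String.ofList fin.2.2]

-- ===== PRECONDITION & SPEC =====
def Spec_get_triple_xor_string (expected_string : String) (allowed_string : String) (out : List String) : Prop := out = get_triple_xor_string_alt expected_string allowed_string
instance (expected_string : String) (allowed_string : String) (out : List String) : Decidable (Spec_get_triple_xor_string expected_string allowed_string out) := by unfold Spec_get_triple_xor_string; infer_instance

-- ===== CLAIM (what is proved, stated in full; the proofs are below) =====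
def Claim_equal_get_triple_xor_string : Prop := ∀ (expected_string : String) (allowed_string : String), Dom_get_triple_xor_string expected_string allowed_string → Spec_get_triple_xor_string expected_string allowed_string (get_triple_xor_string expected_string allowed_string)

-- ===== LEMMAS AND PROOFS =====

-- A's inner loop is find? over the k-list
theorem pvA_loopK_eq (i j : Char) (al ks : List Char) :
    pvA_loopK i j al ks =
      (ks.find? (fun k => al.contains (Char.ofNat (i.toNat ^^^ j.toNat ^^^ k.toNat)))).map
        (fun k => (j, k, Char.ofNat (i.toNat ^^^ j.toNat ^^^ k.toNat))) := by
  induction ks with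
  | nil => rfl
  | cons k ks ih =>
    by_cases h : Char.ofNat (i.toNat ^^^ j.toNat ^^^ k.toNat) ∈ al <;>
      simp [pvA_loopK, h, ih]

-- A's two nested loops are find? over the flattened pair list
theorem pvA_loopJ_eq (i : Char) (al js : List Char) :
    pvA_loopJ i al js =
      ((js.flatMap (fun j => al.map (fun k => (j, k)))).find?
          (fun p => al.contains (Char.ofNat (i.toNat ^^^ p.1.toNat ^^^ p.2.toNat)))).map
        (fun p => (p.1, p.2, Char.ofNat (i.toNat ^^^ p.1.toNat ^^^ p.2.toNat))) := by
  induction js with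
  | nil => rfl
  | cons j js ih =>
    simp only [pvA_loopJ, List.flatMap_cons, List.find?_append, List.find?_map, pvA_loopK_eq]
    have hcomp : ((fun p : Char × Char => al.contains (Char.ofNat (i.toNat ^^^ p.1.toNat ^^^ p.2.toNat))) ∘
        (fun k => (j, k))) = (fun k => al.contains (Char.ofNat (i.toNat ^^^ j.toNat ^^^ k.toNat))) := by
      funext k; rfl
    rw [hcomp]
    cases h : al.find? (fun k => al.contains (Char.ofNat (i.toNat ^^^ j.toNat ^^^ k.toNat))) with
    | some k => simp
    | none => simp [ih]

-- the table-building fold, searched by a key predicate, is find? over the pair list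
theorem pvB_table_find (q : Nat → Bool) (P : List (Char × Char)) (d : PySem.Dict Nat (Char × Char)) :
    ((P.foldl (fun tbl p =>
        let x := p.1.toNat ^^^ p.2.toNat
        if tbl.contains x then tbl else tbl.insert x p) d).items.find? (fun en => q en.1)) =
      (d.items.find? (fun en => q en.1)).or
        ((P.find? (fun p => q (p.1.toNat ^^^ p.2.toNat))).map
          (fun p => (p.1.toNat ^^^ p.2.toNat, p))) := by
  induction P generalizing d with
  | nil => simp
  | cons p P ih =>
    simp only [List.foldl_cons, List.find?_cons]
    by_cases hc : d.contains (p.1.toNat ^^^ p.2.toNat) = true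
    · simp only [hc, if_true, ih]
      by_cases hq : q (p.1.toNat ^^^ p.2.toNat) = true
      · -- d already has that key, and the key satisfies q: the left find? is some
        have hmem : (p.1.toNat ^^^ p.2.toNat) ∈ d.keys :=
          (PySem.Dict.contains_iff_mem_keys d _).mp hc
        simp only [PySem.Dict.keys] at hmem
        obtain ⟨en, hen, hkey⟩ := List.mem_map.mp hmem
        have hne : d.items.find? (fun en => q en.1) ≠ none := by
          intro hnone
          have := List.find?_eq_none.mp hnone en hen
          rw [hkey, hq] at this
          exact this rfl
        cases hfind : d.items.find? (fun en => q en.1) with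
        | none => exact absurd hfind hne
        | some r => simp [hq]
      · simp only [Bool.not_eq_true] at hq
        simp [hq]
    · simp only [Bool.not_eq_true] at hc
      simp only [hc, Bool.false_eq_true, if_false]
      rw [ih, PySem.Dict.items_insert_of_not_contains d p hc, List.find?_append]
      by_cases hq : q (p.1.toNat ^^^ p.2.toNat) = true
      · simp only [hq, if_true, List.find?_singleton, Option.map_some]
        cases hfind : d.items.find? (fun en => q en.1) <;> simp
      · simp only [Bool.not_eq_true] at hq
        simp [hq]

-- find? as findSome? with a guard
theorem pv_find?_eq_findSome? {α : Type} (p : α → Bool) (l : List α) :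
    l.find? p = l.findSome? (fun x => if p x then some x else none) := by
  induction l with
  | nil => rfl
  | cons x l ih => by_cases h : p x <;> simp [h, ih]

-- findSome? over a Set-building fold: elements already present contribute nothing new
theorem pv_findSome?_foldl_add {α β : Type} [BEq α] [LawfulBEq α] (h : α → Option β)
    (l s : List α) :
    (l.foldl PySem.Set.add s).findSome? h = (s.findSome? h).or (l.findSome? h) := by
  induction l generalizing s with
  | nil => simp
  | cons x l ih =>
    rw [List.foldl_cons, ih]
    by_cases hx : x ∈ s
    · have hadd : PySem.Set.add s x = s := by simp [PySem.Set.add, hx]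
      rw [hadd]
      cases hfs : s.findSome? h with
      | some v => simp
      | none =>
        have hx0 : h x = none := List.findSome?_eq_none_iff.mp hfs x hx
        simp [hx0]
    · have hadd : PySem.Set.add s x = s ++ [x] := by simp [PySem.Set.add, hx]
      rw [hadd, List.findSome?_append]
      cases hhx : h x <;> simp [hhx]

theorem pv_findSome?_dedup {α β : Type} [BEq α] [LawfulBEq α] (h : α → Option β) (l : List α) :
    (PySem.List.dedup l).findSome? h = l.findSome? h := by
  rw [PySem.List.dedup_eq_ofList, PySem.Set.ofList_eq_foldl, pv_findSome?_foldl_add]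
  rfl

theorem pv_find?_dedup {α : Type} [BEq α] [LawfulBEq α] (p : α → Bool) (l : List α) :
    (PySem.List.dedup l).find? p = l.find? p := by
  rw [pv_find?_eq_findSome?, pv_find?_eq_findSome?, pv_findSome?_dedup]

-- find? over the j×k pair list, as a findSome? over j
theorem pv_find?_pairs (p : Char × Char → Bool) (js ks : List Char) :
    ((js.flatMap (fun j => ks.map (fun k => (j, k)))).find? p) =
      js.findSome? (fun j => (ks.find? (fun k => p (j, k))).map (fun k => (j, k))) := by
  induction js with
  | nil => rfl
  | cons j js ih =>
    rw [List.flatMap_cons, List.find?_append, List.find?_map, List.findSome?_cons]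
    have hcomp : (p ∘ fun k => (j, k)) = (fun k => p (j, k)) := by funext k; rfl
    rw [hcomp, ih]
    cases hfind : ks.find? (fun k => p (j, k)) <;> simp

-- the deduplicated pair scan finds the same pair as the full pair scan
theorem pv_find?_pairs_dedup (p : Char × Char → Bool) (al : List Char) :
    (((PySem.List.dedup al).flatMap
        (fun j => (PySem.List.dedup al).map (fun k => (j, k)))).find? p) =
      ((al.flatMap (fun j => al.map (fun k => (j, k)))).find? p) := by
  rw [pv_find?_pairs, pv_find?_pairs]
  have hfun : (fun j => ((PySem.List.dedup al).find? (fun k => p (j, k))).map (fun k => (j, k))) =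
      (fun j => (al.find? (fun k => p (j, k))).map (fun k => (j, k))) := by
    funext j; rw [pv_find?_dedup]
  rw [hfun, pv_findSome?_dedup]

-- per expected character, the two lookups agree
theorem pv_char_eq (i : Char) (al : List Char) :
    ((pvB_table (PySem.List.dedup al)).items.find?
        (fun en => PySem.Set.contains (PySem.Set.ofList al) (Char.ofNat (i.toNat ^^^ en.1)))).map
      (fun en => (en.2.1, en.2.2, Char.ofNat (i.toNat ^^^ en.1))) =
    pvA_loopJ i al al := by
  have hset : ∀ c : Char, PySem.Set.contains (PySem.Set.ofList al) c = al.contains c := by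
    intro c
    by_cases h : c ∈ al <;>
      simp [PySem.Set.contains_eq_listContains, PySem.Set.mem_ofList, h]
  rw [pvA_loopJ_eq, pvB_table]
  rw [pvB_table_find (fun x => PySem.Set.contains (PySem.Set.ofList al) (Char.ofNat (i.toNat ^^^ x)))]
  have hempty : (PySem.Dict.empty : PySem.Dict Nat (Char × Char)).items = [] := rfl
  rw [hempty]
  simp only [List.find?_nil, Option.none_or, Option.map_map]
  have hpred : (fun p : Char × Char => PySem.Set.contains (PySem.Set.ofList al)
        (Char.ofNat (i.toNat ^^^ (p.1.toNat ^^^ p.2.toNat)))) =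
      (fun p : Char × Char => al.contains (Char.ofNat (i.toNat ^^^ p.1.toNat ^^^ p.2.toNat))) := by
    funext p; rw [hset, Nat.xor_assoc]
  rw [hpred, pv_find?_pairs_dedup]
  cases hfind : ((al.flatMap fun j => al.map fun k => (j, k)).find?
      fun p => al.contains (Char.ofNat (i.toNat ^^^ p.1.toNat ^^^ p.2.toNat))) with
  | none => simp
  | some p => simp [Function.comp, Nat.xor_assoc]

-- ===== VERDICT (by name: the statement is the Claim_ definition above) =====
theorem get_triple_xor_string_spec : Claim_equal_get_triple_xor_string := by
  intro e a _
  unfold Spec_get_triple_xor_string get_triple_xor_string get_triple_xor_string_alt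
  have hstep : ∀ (acc : List Char × List Char × List Char) (i : Char),
      (match pvA_loopJ i a.toList a.toList with
        | some (j, k, c) => (acc.1 ++ [j], acc.2.1 ++ [k], acc.2.2 ++ [c])
        | none => acc) =
      (match (pvB_table (PySem.List.dedup a.toList)).items.find?
            (fun en => PySem.Set.contains (PySem.Set.ofList a.toList)
              (Char.ofNat (i.toNat ^^^ en.1))) with
        | some (x, j, k) => (acc.1 ++ [j], acc.2.1 ++ [k], acc.2.2 ++ [Char.ofNat (i.toNat ^^^ x)])
        | none => acc) := by
    intro acc i
    rw [← pv_char_eq i a.toList]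
    cases ((pvB_table (PySem.List.dedup a.toList)).items.find?
        (fun en => PySem.Set.contains (PySem.Set.ofList a.toList)
          (Char.ofNat (i.toNat ^^^ en.1)))) with
    | none => rfl
    | some en => rfl
  simp only [funext (fun acc => funext (hstep acc))]
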